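-- pv_equiv track=rewrite | github.com/itrin9634/Algorithm-Study | 프로그래머스/lv1/72410. 신규 아이디 추천/신규 아이디 추천.py | solution
-- ===== SOURCE A (Python) =====
-- def solution(new_id):
--     answer = ''
--
--     new_id = new_id.lower() # 소문자로 치환 1단계
--     for i in range(len(new_id)):
--         cur = new_id[i]
--         if cur.isdigit() or cur.isalpha() or cur == '-' or cur == '_' or cur == '.': #2단계 & 3
--             if answer and (answer[-1] == '.' and cur == '.'): # 3단계
--                 continue
--             answer += cur
--         else:
--             continue
--
--     #4단계
--     if answer and answer[0] == '.':
--         answer = answer[1:]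
--     if answer and answer[-1] == '.':
--         answer = answer[:-1]
--
--     # 5단계
--     if not answer:
--         answer += 'a'
--     # 6단계
--     if len(answer) >= 16:
--         answer = answer[:15]
--         if answer[-1] == '.':
--             answer = answer[:-1]
--     # 7단계
--     if len(answer) <= 2:
--         answer = answer + ((answer[-1]) * (3 - len(answer)))
--
--     return answer
-- ===== SOURCE B (Python) =====
-- def solution(new_id):
--     allowed = 'abcdefghijklmnopqrstuvwxyz0123456789-_.'
--     s = new_id.lower()
--     # table-driven deletion of every disallowed character
--     s = s.translate({ord(c): None for c in set(s) if c not in allowed})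
--     # split on '.' and rejoin: collapses dot runs AND trims end dots in one step
--     s = '.'.join(part for part in s.split('.') if part) or 'a'
--     s = s[:15].rstrip('.')
--     while len(s) < 3:
--         s += s[-1]
--     return s
-- ===== Notes on version B (the rewrite author's own statement) =====
-- stated objective: faster
-- what changed: A's stateful per-character Python loop (accumulator checked against its last kept char) plus four imperative fix-up blocks is replaced by a table-driven str.translate deletion and a split-on-dot / drop-empty-parts / rejoin normalisation that performs the dot-collapsing and both end-trims in one split/join step, followed by truncate+rstrip and a pad loop.
import Mathlib
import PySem

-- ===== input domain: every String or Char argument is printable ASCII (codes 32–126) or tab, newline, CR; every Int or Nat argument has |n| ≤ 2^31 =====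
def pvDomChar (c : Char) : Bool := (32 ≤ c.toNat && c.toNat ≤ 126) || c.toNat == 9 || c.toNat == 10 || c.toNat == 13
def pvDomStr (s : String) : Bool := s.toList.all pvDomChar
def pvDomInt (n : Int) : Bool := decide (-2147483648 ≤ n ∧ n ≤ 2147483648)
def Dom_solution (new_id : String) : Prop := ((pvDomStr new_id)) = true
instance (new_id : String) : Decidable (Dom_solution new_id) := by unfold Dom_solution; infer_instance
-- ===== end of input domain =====

-- B replaces A's stateful per-character scanning loop and its four imperative fix-up blocks
-- by a table-driven translate deletion plus a split-on-dot / drop-empty-parts / rejoin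
-- normalisation (same O(n) asymptotics; measurably faster constants in CPython).


-- ===== PORT A =====
-- one iteration of A's for-loop body (cur already fetched)
def solAStep (ans : List Char) (cur : Char) : List Char :=
  if PySem.Chars.isdigit cur || PySem.Chars.isalpha cur || cur == '-' || cur == '_' || cur == '.' then
    if !ans.isEmpty && (PySem.List.pyGetD ans (-1) 'a' == '.' && cur == '.') then ans
    else ans ++ [cur]
  else ans

def solution (new_id : String) : String :=
  let lowered := PySem.Chars.lower new_id.toList
  -- for i in range(len(new_id)): cur = new_id[i]; …
  let answer0 := (PySem.List.pyRange 0 (lowered.length) 1).foldl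
      (fun ans i => solAStep ans (PySem.List.pyGetD lowered i 'a')) []
  -- step 4
  let answer1 := if !answer0.isEmpty && (PySem.List.pyGetD answer0 0 'a' == '.')
                 then PySem.List.slice answer0 (some 1) none else answer0
  let answer2 := if !answer1.isEmpty && (PySem.List.pyGetD answer1 (-1) 'a' == '.')
                 then PySem.List.slice answer1 none (some (-1)) else answer1
  -- step 5
  let answer3 := if answer2.isEmpty then answer2 ++ ['a'] else answer2
  -- step 6
  let answer4 := if 16 ≤ answer3.length then
                   let t := PySem.List.slice answer3 none (some 15)
                   if PySem.List.pyGetD t (-1) 'a' == '.' then PySem.List.slice t none (some (-1)) else t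
                 else answer3
  -- step 7 (answer[-1] * (3 - len): inside this branch 3 - len ≥ 1, so Nat subtraction is exact)
  let answer5 := if answer4.length ≤ 2 then
                   answer4 ++ List.replicate (3 - answer4.length) (PySem.List.pyGetD answer4 (-1) 'a')
                 else answer4
  String.ofList answer5

-- ===== PORT B =====
def solBAllowed : List Char := "abcdefghijklmnopqrstuvwxyz0123456789-_.".toList

-- s.rstrip('.') ported by hand (PySem offers only the both-ends stripChars): exact —
-- CPython removes the maximal trailing run of chars from the set.
def solBRstripDot (s : List Char) : List Char :=
  (s.reverse.dropWhile (fun c => ['.'].contains c)).reverse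

-- while len(s) < 3: s += s[-1]   (s is never empty when B reaches this loop)
def solBPad (t : List Char) : List Char :=
  if t.length < 3 then
    match PySem.List.pyGet? t (-1) with
    | some c => solBPad (t ++ [c])
    | none => t
  else t
termination_by 3 - t.length
decreasing_by simp [List.length_append]; omega

def solution_alt (new_id : String) : String :=
  let s0 := PySem.Chars.lower new_id.toList
  -- s.translate({ord(c): None for c in set(s) if c not in allowed}): every char of the
  -- table is mapped to None, i.e. deleted (exact on the chars of s0)
  let dels := PySem.Set.ofList (s0.filter (fun c => !solBAllowed.contains c))
  let s1 := s0.filter (fun c => !dels.contains c)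
  -- '.'.join(part for part in s.split('.') if part) or 'a'
  let s2 := PySem.Chars.join ['.'] ((PySem.Chars.splitOn s1 ['.']).filter (fun p => !p.isEmpty))
  let s3 := if s2.isEmpty then ['a'] else s2
  -- s[:15].rstrip('.')
  let s4 := solBRstripDot (PySem.List.slice s3 none (some 15))
  String.ofList (solBPad s4)

-- ===== PRECONDITION & SPEC =====
def Spec_solution (new_id : String) (out : String) : Prop := out = solution_alt new_id
instance (new_id : String) (out : String) : Decidable (Spec_solution new_id out) := by unfold Spec_solution; infer_instance

-- ===== CLAIM (what is proved, stated in full; the proofs are below) =====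
def Claim_equal_solution : Prop := ∀ (new_id : String), Dom_solution new_id → Spec_solution new_id (solution new_id)

-- ===== LEMMAS AND PROOFS =====

-- the collapse of consecutive dots, keyed by the PREVIOUS character of the filtered list
def pvCol : Option Char → List Char → List Char
  | _, [] => []
  | prev, c :: cs => if c == '.' && prev == some '.' then pvCol (some c) cs
                     else c :: pvCol (some c) cs

-- head-recursive characterisation of s.split('.')
def pvSplit : List Char → List (List Char)
  | [] => [[]]
  | c :: rest => if c == '.' then [] :: pvSplit rest else (pvSplit rest).modifyHead (c :: ·)

-- join of the nonempty parts (B's value after the split/join step)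
def pvGt (l : List Char) : List Char :=
  List.intercalate ['.'] ((pvSplit l).filter (fun p => !p.isEmpty))

-- same, but the FIRST part is kept even when empty (state after a non-dot character)
def pvGf (l : List Char) : List Char :=
  match pvSplit l with
  | [] => []
  | p :: ps => List.intercalate ['.'] (p :: ps.filter (fun q => !q.isEmpty))

set_option maxRecDepth 4096 in
theorem pvCondChar (c : Char) (h : pvDomChar c = true) :
    (PySem.Chars.isdigit (PySem.Chars.lowerChar c) || PySem.Chars.isalpha (PySem.Chars.lowerChar c) ||
      PySem.Chars.lowerChar c == '-' || PySem.Chars.lowerChar c == '_' || PySem.Chars.lowerChar c == '.')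
    = solBAllowed.contains (PySem.Chars.lowerChar c) := by
  have hlt : c.toNat < 128 := by
    simp [pvDomChar] at h
    omega
  have hall : ∀ n < 128,
      (PySem.Chars.isdigit (PySem.Chars.lowerChar (Char.ofNat n)) || PySem.Chars.isalpha (PySem.Chars.lowerChar (Char.ofNat n)) ||
        PySem.Chars.lowerChar (Char.ofNat n) == '-' || PySem.Chars.lowerChar (Char.ofNat n) == '_' || PySem.Chars.lowerChar (Char.ofNat n) == '.')
      = solBAllowed.contains (PySem.Chars.lowerChar (Char.ofNat n)) := by decide
  have := hall c.toNat hlt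
  rwa [Char.ofNat_toNat] at this

-- deleting the disallowed chars of s0 (B's translate table) = keeping the allowed chars
theorem pvTranslateEq (s0 : List Char) :
    s0.filter (fun c => !(PySem.Set.ofList (s0.filter (fun c => !solBAllowed.contains c))).contains c)
    = s0.filter (fun c => solBAllowed.contains c) := by
  apply List.filter_congr
  intro c hc
  by_cases hall : solBAllowed.contains c = true
  · simp [PySem.Set.mem_ofList, List.mem_filter]
    exact fun _ => by simpa using hall
  · simp [PySem.Set.mem_ofList, List.mem_filter, hc]

-- A's loop equals pvCol, with the accumulator-tail invariant
theorem pvFoldCol (l : List Char) : ∀ (ans : List Char) (prev : Option Char),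
    ((!ans.isEmpty && (PySem.List.pyGetD ans (-1) 'a' == '.')) = (prev == some '.')) →
    l.foldl (fun ans c =>
      if !ans.isEmpty && (PySem.List.pyGetD ans (-1) 'a' == '.' && c == '.') then ans
      else ans ++ [c]) ans = ans ++ pvCol prev l := by
  induction l with
  | nil => intro ans prev _; simp [pvCol]
  | cons c cs ih =>
    intro ans prev hinv
    have hguard : (!ans.isEmpty && (PySem.List.pyGetD ans (-1) 'a' == '.' && c == '.'))
        = ((prev == some '.') && c == '.') := by
      rw [← Bool.and_assoc, hinv]
    by_cases hcond : (c == '.' && prev == some '.') = true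
    · have h1 : ((prev == some '.') && c == '.') = true := by
        rw [Bool.and_comm]; exact hcond
      rw [List.foldl_cons, hguard, h1, if_pos rfl]
      rw [pvCol, if_pos hcond]
      apply ih
      have hc : c = '.' := by simpa using (Bool.and_elim_left hcond)
      have hp : prev = some '.' := by simpa using (Bool.and_elim_right hcond)
      rw [hinv, hp, hc]
    · have h1 : ((prev == some '.') && c == '.') = false := by
        rw [Bool.and_comm]; exact Bool.not_eq_true _ ▸ (by simpa using hcond)
      rw [List.foldl_cons, hguard, h1]
      simp only [Bool.false_eq_true, if_false]
      rw [pvCol, if_neg hcond, ih (ans ++ [c]) (some c) ?_, List.append_assoc]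
      · rfl
      · simp [PySem.List.pyGetD_neg_one_append_singleton]

-- pvCol never emits a dot right after a dot
theorem pvColHead (cs : List Char) : (pvCol (some '.') cs).head? ≠ some '.' := by
  induction cs with
  | nil => simp [pvCol]
  | cons c cs ih =>
    by_cases hc : c = '.' <;> simp [pvCol, hc, ih]

theorem pvColChain (prev : Option Char) (cs : List Char) :
    (pvCol prev cs).IsChain (fun a b => ¬(a = '.' ∧ b = '.')) := by
  induction cs generalizing prev with
  | nil => simp [pvCol]
  | cons c cs ih =>
    by_cases hcond : (c == '.' && prev == some '.') = true
    · simpa [pvCol, hcond] using ih (some c)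
    · rw [pvCol, if_neg hcond]
      rw [List.isChain_cons]
      refine ⟨?_, ih (some c)⟩
      intro y hy hcy
      by_cases hc : c = '.'
      · subst hc
        exact pvColHead cs (by rw [hy]; simp [hcy.2])
      · exact hc hcy.1

def pvTrimH (m : List Char) : List Char := if m.head? = some '.' then m.tail else m
def pvTrimT (m : List Char) : List Char := if m.getLast? = some '.' then m.dropLast else m

theorem pvContainsDot (c : Char) : (['.'].contains c) = (c == '.') := by
  simp only [List.contains_cons, List.contains_nil, Bool.or_false]

theorem pvHeadDropWhile {p : Char → Bool} {l : List Char} {a : Char}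
    (h : (l.dropWhile p).head? = some a) : p a = false := by
  induction l with
  | nil => simp at h
  | cons x xs ih =>
    rw [List.dropWhile_cons] at h
    by_cases hp : p x = true
    · rw [if_pos hp] at h; exact ih h
    · rw [if_neg hp] at h; simp at h; subst h; simpa using hp

-- single dropWhile removes exactly one dot, on lists without adjacent dots
theorem pvDropWhileEqTrimH (m : List Char) (hch : m.IsChain (fun a b => ¬(a = '.' ∧ b = '.'))) :
    m.dropWhile (fun c => ['.'].contains c) = pvTrimH m := by
  cases m with
  | nil => rfl
  | cons c cs =>
    by_cases hc : c = '.'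
    · subst hc
      simp only [List.dropWhile_cons, pvContainsDot, pvTrimH, List.head?_cons, List.tail_cons,
        BEq.rfl, if_true]
      cases cs with
      | nil => rfl
      | cons d ds =>
        have hd : d ≠ '.' := by
          intro h; exact (List.isChain_cons_cons.mp hch).1 ⟨rfl, h⟩
        simp [hd]
    · simp [hc, pvTrimH]

theorem pvRevDropWhileEqTrimT (m : List Char) (hch : m.IsChain (fun a b => ¬(a = '.' ∧ b = '.'))) :
    (m.reverse.dropWhile (fun c => ['.'].contains c)).reverse = pvTrimT m := by
  cases hrev : m.reverse with
  | nil =>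
    have : m = [] := by simpa using congrArg List.reverse hrev
    subst this; rfl
  | cons a as =>
    have hm : m = as.reverse ++ [a] := List.reverse_eq_cons_iff.mp hrev
    have hlast : m.getLast? = some a := by rw [hm]; simp
    by_cases ha : a = '.'
    · subst ha
      have hch' : (('.' :: as : List Char)).IsChain (fun a b => ¬(a = '.' ∧ b = '.')) := by
        rw [← hrev]
        exact List.isChain_reverse.mpr (by
          have : (fun a b : Char => ¬(a = '.' ∧ b = '.')) = flip (fun a b : Char => ¬(a = '.' ∧ b = '.')) := by
            funext x y; simp [flip, and_comm]
          rw [this] at hch; exact hch)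
      have has : as.dropWhile (fun c => c == '.') = as := by
        cases as with
        | nil => rfl
        | cons d ds =>
          have hd : d ≠ '.' := by
            intro h; exact (List.isChain_cons_cons.mp hch').1 ⟨rfl, h⟩
          simp [hd]
      simp only [List.dropWhile_cons, pvContainsDot, BEq.rfl, if_true, has]
      rw [pvTrimT, if_pos hlast, hm]
      exact List.dropLast_concat.symm
    · rw [List.dropWhile_cons, if_neg (by simp [ha]), ← hrev]
      rw [List.reverse_reverse, pvTrimT, if_neg (by rw [hlast]; simp [ha])]

-- one .strip('.') equals A's two single-dot trims, on lists without adjacent dots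
theorem pvStripEqTrim (m : List Char) (hch : m.IsChain (fun a b => ¬(a = '.' ∧ b = '.'))) :
    PySem.Chars.stripChars m ['.'] = pvTrimT (pvTrimH m) := by
  rw [PySem.Chars.stripChars, pvDropWhileEqTrimH m hch]
  refine pvRevDropWhileEqTrimT _ ?_
  unfold pvTrimH
  split
  · exact hch.tail
  · exact hch

-- a stripped list has no dot at either end
theorem pvStripHead (m : List Char) :
    (PySem.Chars.stripChars m ['.']).head? ≠ some '.' := by
  rw [PySem.Chars.stripChars]
  intro h
  rw [List.head?_reverse] at h
  set X := (m.dropWhile (fun c => ['.'].contains c)).reverse with hX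
  have hne : X.dropWhile (fun c => ['.'].contains c) ≠ [] := by
    intro h0; rw [h0] at h; simp at h
  have hsuf : X.dropWhile (fun c => ['.'].contains c) <:+ X := List.dropWhile_suffix _
  obtain ⟨t, ht⟩ := hsuf
  have hgl : (X.dropWhile (fun c => ['.'].contains c)).getLast? = X.getLast? := by
    conv_rhs => rw [← ht]
    exact (List.getLast?_append_of_ne_nil t hne).symm
  rw [hgl, hX, List.getLast?_reverse] at h
  have := pvHeadDropWhile h
  simp at this

theorem pvStripLast (m : List Char) :
    (PySem.Chars.stripChars m ['.']).getLast? ≠ some '.' := by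
  rw [PySem.Chars.stripChars]
  intro h
  rw [List.getLast?_reverse] at h
  have := pvHeadDropWhile h
  simp at this

theorem pvStripChain (m : List Char) (hch : m.IsChain (fun a b => ¬(a = '.' ∧ b = '.'))) :
    (PySem.Chars.stripChars m ['.']).IsChain (fun a b => ¬(a = '.' ∧ b = '.')) := by
  rw [pvStripEqTrim m hch]
  have h1 : (pvTrimH m).IsChain (fun a b => ¬(a = '.' ∧ b = '.')) := by
    unfold pvTrimH; split
    · exact hch.tail
    · exact hch
  unfold pvTrimT; split
  · exact h1.dropLast
  · exact h1

-- A's for-loop over indices equals pvCol of the filtered lowered list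
theorem pvLoopEq (lowered : List Char)
    (hcond : ∀ c ∈ lowered,
      (PySem.Chars.isdigit c || PySem.Chars.isalpha c || c == '-' || c == '_' || c == '.')
      = solBAllowed.contains c) :
    (PySem.List.pyRange 0 (lowered.length) 1).foldl
      (fun ans i => solAStep ans (PySem.List.pyGetD lowered i 'a')) []
    = pvCol none (lowered.filter (fun c => solBAllowed.contains c)) := by
  rw [PySem.List.foldl_pyRange_zero_pyGetD' lowered 'a' solAStep []]
  have h1 : lowered.foldl solAStep []
      = (lowered.filter (fun c =>
          PySem.Chars.isdigit c || PySem.Chars.isalpha c || c == '-' || c == '_' || c == '.')).foldl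
        (fun ans c =>
          if !ans.isEmpty && (PySem.List.pyGetD ans (-1) 'a' == '.' && c == '.') then ans
          else ans ++ [c]) [] := by
    rw [List.foldl_filter]
    rfl
  rw [h1, List.filter_congr hcond]
  exact pvFoldCol _ [] none (by simp)

-- A's first fix-up equals pvTrimH
theorem pvA1 (m : List Char) :
    (if !m.isEmpty && (PySem.List.pyGetD m 0 'a' == '.')
     then PySem.List.slice m (some 1) none else m) = pvTrimH m := by
  cases m with
  | nil => rfl
  | cons c cs =>
    rw [PySem.List.slice_from_one]
    by_cases hc : c = '.' <;> simp [pvTrimH, PySem.List.pyGetD_zero_cons, hc]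

-- A's second fix-up equals pvTrimT
theorem pvA2 (m : List Char) :
    (if !m.isEmpty && (PySem.List.pyGetD m (-1) 'a' == '.')
     then PySem.List.slice m none (some (-1)) else m) = pvTrimT m := by
  rcases eq_or_ne m [] with rfl | hne
  · rfl
  · rw [PySem.List.slice_to_neg_one, PySem.List.pyGetD_neg_one m 'a' hne, pvTrimT]
    rw [List.getLast?_eq_some_getLast hne]
    by_cases hl : m.getLast hne = '.' <;> simp [hl, hne]

-- ---- B-side: split('.') characterisation ----

theorem pvSplit_ne_nil (l : List Char) : pvSplit l ≠ [] := by
  induction l with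
  | nil => simp [pvSplit]
  | cons c rest ih =>
    rw [pvSplit]
    split
    · simp
    · cases h : pvSplit rest with
      | nil => exact absurd h ih
      | cons p ps => simp [List.modifyHead]

theorem pvGo (fuel : Nat) : ∀ (l cur : List Char) (acc : List (List Char)), l.length ≤ fuel →
    PySem.Chars.splitOn.go ['.'] fuel l cur acc
      = acc.reverse ++ (pvSplit l).modifyHead (cur.reverse ++ ·) := by
  induction fuel with
  | zero =>
    intro l cur acc h
    have : l = [] := by cases l <;> simp_all
    subst this
    simp [PySem.Chars.splitOn.go, pvSplit, List.modifyHead]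
  | succ fuel ih =>
    intro l cur acc h
    cases l with
    | nil => simp [PySem.Chars.splitOn.go, pvSplit, List.modifyHead]
    | cons c rest =>
      have hlen : rest.length ≤ fuel := by simpa using h
      rw [PySem.Chars.splitOn.go]
      rcases hps : pvSplit rest with _ | ⟨p, ps⟩
      · exact absurd hps (pvSplit_ne_nil rest)
      · by_cases hc : c = '.'
        · subst hc
          have hpre : (['.'] : List Char).isPrefixOf ('.' :: rest) = true := by
            simp [List.isPrefixOf]
          rw [if_pos hpre]
          rw [ih _ _ _ (by simpa using hlen)]
          simp [pvSplit, hps, List.modifyHead]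
        · have hpre : (['.'] : List Char).isPrefixOf (c :: rest) = false := by
            simp [List.isPrefixOf]
            exact fun h => absurd h.symm hc
          rw [if_neg (by simp [hpre])]
          rw [ih _ _ _ hlen]
          simp [pvSplit, hc, hps, List.modifyHead]

theorem pvSplitOnEq (s : List Char) : PySem.Chars.splitOn s ['.'] = pvSplit s := by
  rw [PySem.Chars.splitOn, pvGo (s.length + 1) s [] [] (Nat.le_succ _)]
  rcases hps : pvSplit s with _ | ⟨p, ps⟩
  · exact absurd hps (pvSplit_ne_nil s)
  · simp [List.modifyHead]

-- ---- B-side: rstrip('.') facts ----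

theorem pvRstrip_cons (a : Char) (t : List Char) :
    solBRstripDot (a :: t)
      = if solBRstripDot t = [] then solBRstripDot [a] else a :: solBRstripDot t := by
  unfold solBRstripDot
  rw [List.reverse_cons, List.dropWhile_append]
  by_cases he : (List.dropWhile (fun c => ['.'].contains c) t.reverse).isEmpty = true
  · rw [if_pos he, if_pos (by simpa [List.isEmpty_iff] using he)]
    simp
  · rw [if_neg he, if_neg (by simpa [List.isEmpty_iff] using he)]
    simp

theorem pvRstrip_single_dot : solBRstripDot ['.'] = [] := by decide

theorem pvRstrip_single (a : Char) (ha : a ≠ '.') : solBRstripDot [a] = [a] := by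
  simp [solBRstripDot, ha]

-- intercalate of nonempty parts vanishes only on the empty part list
theorem pvInterNil (L : List (List Char)) (h : ∀ p ∈ L, p ≠ []) :
    List.intercalate ['.'] L = [] ↔ L = [] := by
  cases L with
  | nil => simp [List.intercalate]
  | cons x t =>
    cases t with
    | nil => simpa [List.intercalate] using h x (by simp)
    | cons y t' =>
      constructor
      · intro hi
        exfalso
        have : x ++ ['.'] ++ List.intercalate ['.'] (y :: t') = [] := by
          simp [List.intercalate, List.intersperse] at hi
        simpa using congrArg List.length this
      · intro hi; exact absurd hi (by simp)

theorem pvInterCons2 (x y : List Char) (t : List (List Char)) :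
    List.intercalate ['.'] (x :: y :: t) = x ++ ['.'] ++ List.intercalate ['.'] (y :: t) := by
  simp [List.intercalate, List.intersperse]

-- main: right-stripping the collapsed string = joining the nonempty split parts
theorem pvMain (l : List Char) :
    solBRstripDot (pvCol (some '.') l) = pvGt l ∧
    ∀ prev : Option Char, (prev == some '.') = false → solBRstripDot (pvCol prev l) = pvGf l := by
  induction l with
  | nil =>
    constructor
    · simp [pvCol, pvGt, pvSplit, solBRstripDot, List.intercalate]
    · intro prev _; simp [pvCol, pvGf, pvSplit, solBRstripDot, List.intercalate]
  | cons c l ih =>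
    by_cases hc : c = '.'
    · subst hc
      constructor
      · rw [pvCol, if_pos (by simp)]
        rw [ih.1]
        simp [pvGt, pvSplit]
      · intro prev hprev
        rw [pvCol, if_neg (by simp [hprev])]
        rw [pvRstrip_cons, ih.1, pvRstrip_single_dot]
        have hGf : pvGf ('.' :: l)
            = List.intercalate ['.'] ([] :: (pvSplit l).filter (fun q => !q.isEmpty)) := by
          unfold pvGf
          rcases hps : pvSplit ('.' :: l) with _ | ⟨p, ps⟩
          · exact absurd hps (pvSplit_ne_nil _)
          · rw [pvSplit, if_pos (by simp)] at hps
            obtain ⟨rfl, rfl⟩ : ([] : List Char) = p ∧ pvSplit l = ps := by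
              constructor <;> [exact (List.cons_eq_cons.mp hps).1; exact (List.cons_eq_cons.mp hps).2]
            rfl
        rw [hGf]
        rcases hL : (pvSplit l).filter (fun q => !q.isEmpty) with _ | ⟨y, ys⟩
        · rw [hL, if_pos (by simp [pvGt, hL, List.intercalate])]
          simp [List.intercalate]
        · have hne : pvGt l ≠ [] := by
            rw [pvGt, hL]
            intro hcontra
            have := (pvInterNil (y :: ys) ?_).mp hcontra
            · simp at this
            · intro p hp
              have := List.of_mem_filter (hL ▸ hp)
              simpa [List.isEmpty_iff] using this
          rw [hL, if_neg hne, pvInterCons2, pvGt, hL]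
          simp
    · have hstep : ∀ prev : Option Char,
          solBRstripDot (pvCol prev (c :: l)) = pvGt (c :: l) ∧ pvGf (c :: l) = pvGt (c :: l) := by
        intro prev
        rw [pvCol, if_neg (by simp [hc])]
        rw [pvRstrip_cons, ih.2 (some c) (by simp [hc])]
        rcases hps : pvSplit l with _ | ⟨p, ps⟩
        · exact absurd hps (pvSplit_ne_nil _)
        have hsp : pvSplit (c :: l) = (c :: p) :: ps := by
          rw [pvSplit, if_neg (by simp [hc]), hps]; rfl
        have hGfl : pvGf l = List.intercalate ['.'] (p :: ps.filter (fun q => !q.isEmpty)) := by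
          unfold pvGf; rw [hps]
        have hGtc : pvGt (c :: l)
            = List.intercalate ['.'] ((c :: p) :: ps.filter (fun q => !q.isEmpty)) := by
          rw [pvGt, hsp]; simp
        have hGfc : pvGf (c :: l)
            = List.intercalate ['.'] ((c :: p) :: ps.filter (fun q => !q.isEmpty)) := by
          unfold pvGf; rw [hsp]
        refine ⟨?_, by rw [hGfc, hGtc]⟩
        rw [hGfl, hGtc]
        rcases hL : ps.filter (fun q => !q.isEmpty) with _ | ⟨y, ys⟩
        · rw [hL]
          by_cases hp : p = []
          · subst hp
            rw [if_pos (by simp [List.intercalate])]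
            simp [List.intercalate, pvRstrip_single c hc]
          · rw [if_neg (by simpa [List.intercalate] using hp)]
            simp [List.intercalate]
        · have hne : List.intercalate ['.'] (p :: y :: ys) ≠ [] := by
            rw [pvInterCons2]
            intro hcontra
            simpa using congrArg List.length hcontra
          rw [hL, if_neg hne, pvInterCons2, pvInterCons2]
          simp
      exact ⟨(hstep (some '.')).1, fun prev _ => by rw [(hstep prev).1, (hstep prev).2]⟩

-- a list not starting with a dot survives the left dropWhile
theorem pvDropWhileId (t : List Char) (h : t.head? ≠ some '.') :
    t.dropWhile (fun c => ['.'].contains c) = t := by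
  cases t with
  | nil => rfl
  | cons x xs =>
    have hx : x ≠ '.' := by intro hx; exact h (by simp [hx])
    simp [hx]

-- pvGf = pvGt when the string starts with a non-dot
theorem pvGfGt (c : Char) (l : List Char) (hc : c ≠ '.') : pvGf (c :: l) = pvGt (c :: l) := by
  rcases hps : pvSplit l with _ | ⟨p, ps⟩
  · exact absurd hps (pvSplit_ne_nil _)
  have hsp : pvSplit (c :: l) = (c :: p) :: ps := by
    rw [pvSplit, if_neg (by simp [hc]), hps]; rfl
  unfold pvGf
  rw [hsp, pvGt, hsp]
  simp

-- strip('.') of the collapsed string = B's split/join normal form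
theorem pvStripColEq (m : List Char) :
    PySem.Chars.stripChars (pvCol none m) ['.'] = pvGt m := by
  cases m with
  | nil => simp [pvCol, pvGt, pvSplit, PySem.Chars.stripChars, List.intercalate]
  | cons c l =>
    by_cases hc : c = '.'
    · subst hc
      rw [pvCol, if_neg (by simp)]
      show solBRstripDot (List.dropWhile _ ('.' :: pvCol (some '.') l)) = _
      rw [List.dropWhile_cons, if_pos (by simp), pvDropWhileId _ (pvColHead l), (pvMain l).1]
      simp [pvGt, pvSplit]
    · rw [pvCol, if_neg (by simp)]
      show solBRstripDot (List.dropWhile _ (c :: pvCol (some c) l)) = _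
      rw [pvDropWhileId _ (by simp [hc])]
      have := (pvMain (c :: l)).2 none rfl
      rw [pvCol, if_neg (by simp)] at this
      rw [this, pvGfGt c l hc]

-- ---- tail steps ----

theorem pvPad3 (u : List Char) (h : ¬ u.length < 3) : solBPad u = u := by
  rw [solBPad]; rw [if_neg h]

theorem pvPad1 (a : Char) : solBPad [a] = [a, a, a] := by
  rw [solBPad]
  simp [PySem.List.pyGet?_neg_one]
  rw [solBPad]
  simp [PySem.List.pyGet?_neg_one]
  rw [solBPad]
  simp

theorem pvPad2 (a b : Char) : solBPad [a, b] = [a, b, b] := by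
  rw [solBPad]
  simp [PySem.List.pyGet?_neg_one]
  rw [solBPad]
  simp

theorem pvPadEq (u : List Char) (hne : u ≠ []) :
    solBPad u = if u.length ≤ 2
      then u ++ List.replicate (3 - u.length) (PySem.List.pyGetD u (-1) 'a') else u := by
  match u, hne with
  | [a], _ =>
    rw [pvPad1, if_pos (by simp)]
    rw [PySem.List.pyGetD_neg_one [a] 'a' (by simp)]
    simp [List.replicate]
  | [a, b], _ =>
    rw [pvPad2, if_pos (by simp)]
    rw [PySem.List.pyGetD_neg_one [a, b] 'a' (by simp)]
    simp
  | a :: b :: c :: r, _ =>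
    rw [pvPad3 _ (by simp)]
    rw [if_neg (by simp)]

-- steps 5–7 of A equal B's truncate / rstrip / pad tail, for any chain list with no dot at either end
theorem pvFinish (t0 : List Char) (hh : t0.head? ≠ some '.') (hl : t0.getLast? ≠ some '.')
    (hch : t0.IsChain (fun a b => ¬(a = '.' ∧ b = '.'))) :
    (let answer3 := if t0.isEmpty then t0 ++ ['a'] else t0
     let answer4 := if 16 ≤ answer3.length then
         let t := PySem.List.slice answer3 none (some 15)
         if PySem.List.pyGetD t (-1) 'a' == '.' then PySem.List.slice t none (some (-1)) else t
       else answer3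
     if answer4.length ≤ 2
     then answer4 ++ List.replicate (3 - answer4.length) (PySem.List.pyGetD answer4 (-1) 'a')
     else answer4)
    = solBPad (solBRstripDot (PySem.List.slice (if t0.isEmpty then ['a'] else t0) none (some 15))) := by
  dsimp only
  have h3 : (if t0.isEmpty = true then t0 ++ ['a'] else t0)
      = (if t0.isEmpty = true then ['a'] else t0) := by
    cases t0 <;> rfl
  rw [h3]
  set t1 := if t0.isEmpty = true then ['a'] else t0 with ht1
  have hne1 : t1 ≠ [] := by
    rw [ht1]; cases t0 <;> simp
  have hl1 : t1.getLast? ≠ some '.' := by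
    rw [ht1]; cases t0 with
    | nil => simp
    | cons c cs => simpa using hl
  have hch1 : t1.IsChain (fun a b => ¬(a = '.' ∧ b = '.')) := by
    rw [ht1]; cases t0 with
    | nil => simp
    | cons c cs => simpa using hch
  have htake : PySem.List.slice t1 none (some 15) = t1.take 15 := by
    rw [PySem.List.slice_to t1 (by norm_num)]; rfl
  have hchT : (t1.take 15).IsChain (fun a b => ¬(a = '.' ∧ b = '.')) :=
    hch1.prefix (List.take_prefix _ _)
  have hB3 : solBRstripDot (t1.take 15) = pvTrimT (t1.take 15) :=
    pvRevDropWhileEqTrimT _ hchT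
  rw [htake, hB3]
  by_cases hlen : 16 ≤ t1.length
  · rw [if_pos hlen]
    have hlt : (t1.take 15).length = 15 := by
      rw [List.length_take]; omega
    have hnet : t1.take 15 ≠ [] := by
      intro h; rw [h] at hlt; simp at hlt
    have hA : (if PySem.List.pyGetD (t1.take 15) (-1) 'a' == '.'
        then PySem.List.slice (t1.take 15) none (some (-1)) else t1.take 15)
        = pvTrimT (t1.take 15) := by
      rw [PySem.List.slice_to_neg_one, PySem.List.pyGetD_neg_one _ 'a' hnet, pvTrimT,
        List.getLast?_eq_some_getLast hnet]
      by_cases hd : (t1.take 15).getLast hnet = '.' <;> simp [hd]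
    rw [hA]
    have hneT : pvTrimT (t1.take 15) ≠ [] := by
      unfold pvTrimT
      split
      · intro h
        have := congrArg List.length h
        rw [List.length_dropLast, hlt] at this
        simp at this
      · exact hnet
    rw [pvPadEq _ hneT]
  · rw [if_neg hlen]
    have htk : t1.take 15 = t1 := List.take_of_length_le (by omega)
    have hTT : pvTrimT t1 = t1 := by
      rw [pvTrimT, if_neg hl1]
    rw [htk, hTT, pvPadEq _ hne1]

-- ===== VERDICT (by name: the statement is the Claim_ definition above) =====
set_option maxHeartbeats 1000000 in
theorem solution_spec : Claim_equal_solution := by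
  intro s hdom
  unfold Spec_solution solution solution_alt
  have hcond : ∀ c ∈ PySem.Chars.lower s.toList,
      (PySem.Chars.isdigit c || PySem.Chars.isalpha c || c == '-' || c == '_' || c == '.')
      = solBAllowed.contains c := by
    intro c hc
    rw [PySem.Chars.lower, List.mem_map] at hc
    obtain ⟨c0, hc0, rfl⟩ := hc
    have hdc : pvDomChar c0 = true := by
      have := (List.all_eq_true.mp hdom) c0 hc0
      simpa using this
    exact pvCondChar c0 hdc
  dsimp only
  rw [pvLoopEq _ hcond, pvA1, pvA2, ← pvStripEqTrim _ (pvColChain none _)]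
  rw [pvTranslateEq, pvSplitOnEq]
  have hjoin : PySem.Chars.join ['.']
      ((pvSplit ((PySem.Chars.lower s.toList).filter (fun c => solBAllowed.contains c))).filter
        (fun p => !p.isEmpty))
      = pvGt ((PySem.Chars.lower s.toList).filter (fun c => solBAllowed.contains c)) := rfl
  rw [hjoin, ← pvStripColEq]
  exact congrArg String.ofList
    (pvFinish (PySem.Chars.stripChars
      (pvCol none (List.filter (fun c => solBAllowed.contains c) (PySem.Chars.lower s.toList))) ['.'])
      (pvStripHead _) (pvStripLast _) (pvStripChain _ (pvColChain none _)))
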